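-- pv_equiv track=rewrite | github.com/gavinjackson/bsides--ctf | ultimate_solver.py | find_words_in_9x9_section
-- ===== SOURCE A (Python) =====
-- def find_words_in_9x9_section(section, words):
--     """Find words in a 9x9 section"""
--     # Convert to 9x9 grid
--     grid = []
--     for i in range(9):
--         row = []
--         for j in range(9):
--             pos = i * 9 + j
--             if pos < len(section):
--                 row.append(section[pos])
--             else:
--                 row.append(' ')
--         grid.append(row)
--
--     found = []
--     for word in words:
--         if find_word_in_grid_section(grid, word):
--             found.append(word)
--
--     return found
--
-- def find_word_in_grid_section(grid, word):
--     """Find word in grid section"""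
--     for row in range(9):
--         for col in range(9):
--             directions = [(0,1), (0,-1), (1,0), (-1,0), (1,1), (1,-1), (-1,1), (-1,-1)]
--             for dr, dc in directions:
--                 if check_word_at_position(grid, word, row, col, dr, dc):
--                     return True
--     return False
--
-- def check_word_at_position(grid, word, start_row, start_col, dr, dc):
--     """Check if word exists at position"""
--     for i, char in enumerate(word):
--         row = start_row + i * dr
--         col = start_col + i * dc
--         if row < 0 or row >= 9 or col < 0 or col >= 9:
--             return False
--         if grid[row][col] != char:
--             return False
--     return True
-- ===== SOURCE B (Python) =====
-- def find_words_in_9x9_section(section, words):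
--     """Find words in a 9x9 section"""
--     grid = [[section[i * 9 + j] if i * 9 + j < len(section) else ' '
--              for j in range(9)] for i in range(9)]
--     # Precompute every string readable from some cell in some direction
--     # (every prefix of every ray); the empty word is readable anywhere.
--     readable = {""}
--     for r in range(9):
--         for c in range(9):
--             for dr, dc in ((0, 1), (0, -1), (1, 0), (-1, 0),
--                            (1, 1), (1, -1), (-1, 1), (-1, -1)):
--                 s = ""
--                 rr, cc = r, c
--                 while 0 <= rr < 9 and 0 <= cc < 9:
--                     s += grid[rr][cc]
--                     readable.add(s)
--                     rr += dr
--                     cc += dc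
--     return [w for w in words if w in readable]
-- ===== Notes on version B (the rewrite author's own statement) =====
-- stated objective: faster
-- what changed: Instead of rescanning all 81 cells and 8 directions for every word, B precomputes once the set of all strings readable in the grid (every ray prefix, plus the empty string) and then answers each word by a set-membership test.
import Mathlib
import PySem

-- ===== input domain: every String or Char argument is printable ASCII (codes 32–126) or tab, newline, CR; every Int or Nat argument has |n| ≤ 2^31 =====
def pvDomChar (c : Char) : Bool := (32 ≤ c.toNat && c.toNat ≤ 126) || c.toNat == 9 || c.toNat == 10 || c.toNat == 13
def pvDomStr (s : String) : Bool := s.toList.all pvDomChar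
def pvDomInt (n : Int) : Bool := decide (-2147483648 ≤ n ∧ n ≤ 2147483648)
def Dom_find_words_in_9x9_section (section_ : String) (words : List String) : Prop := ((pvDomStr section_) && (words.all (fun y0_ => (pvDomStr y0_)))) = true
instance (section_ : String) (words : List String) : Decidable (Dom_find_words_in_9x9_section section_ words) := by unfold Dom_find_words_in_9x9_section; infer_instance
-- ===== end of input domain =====

-- B precomputes the set of every string readable from any cell in any of the 8 directions
-- (all ray prefixes, plus the empty string) and tests each word by set membership,
-- instead of scanning the whole grid once per word; faster when many words are searched.

-- ===== PORT A =====
-- 9x9 grid built from the section, space-padded past its end (shared verbatim by both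
-- programs: A and B build the identical grid)
def pvGrid (cs : List Char) : List (List Char) :=
  (List.range 9).map (fun i => (List.range 9).map (fun j =>
    if h : i * 9 + j < cs.length then cs[i * 9 + j] else ' '))

def pvDirs : List (Int × Int) := [(0,1),(0,-1),(1,0),(-1,0),(1,1),(1,-1),(-1,1),(-1,-1)]

-- check_word_at_position: the loop over enumerate(word); row/col carry start + i*d incrementally
def pvCheckAt (g : List (List Char)) : List Char → Int → Int → Int → Int → Bool
  | [], _, _, _, _ => true
  | ch :: rest, r, c, dr, dc =>
      if r < 0 ∨ 9 ≤ r ∨ c < 0 ∨ 9 ≤ c then false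
      else if ((g.getD r.toNat []).getD c.toNat ' ') ≠ ch then false
      else pvCheckAt g rest (r + dr) (c + dc) dr dc

-- find_word_in_grid_section: any start cell, any direction
def pvFindInGrid (g : List (List Char)) (w : List Char) : Bool :=
  (List.range 9).any (fun (row : Nat) => (List.range 9).any (fun (col : Nat) =>
    pvDirs.any (fun d => pvCheckAt g w (row : Int) (col : Int) d.1 d.2)))

def find_words_in_9x9_section (section_ : String) (words : List String) : List String :=
  let grid := pvGrid section_.toList
  words.filter (fun w => pvFindInGrid grid w.toList)

-- ===== PORT B =====
-- Source B's while loop: walk from (r,c) in direction (dr,dc) while in bounds, adding each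
-- accumulated prefix to the set.  Fuel 9 is exact: every direction moves a coordinate by
-- ±1 each step and only 9 in-bounds values exist, so the Python loop runs ≤ 9 times.
def pvRayAdd (g : List (List Char)) (dr dc : Int) : Nat → Int → Int → List Char → PySem.Set String → PySem.Set String
  | 0, _, _, _, s => s
  | fuel + 1, r, c, acc, s =>
      if 0 ≤ r ∧ r < 9 ∧ 0 ≤ c ∧ c < 9 then
        pvRayAdd g dr dc fuel (r + dr) (c + dc) (acc ++ [(g.getD r.toNat []).getD c.toNat ' '])
          (PySem.Set.add s (String.ofList (acc ++ [(g.getD r.toNat []).getD c.toNat ' '])))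
      else s

-- readable = {""} then the triple loop over starts and directions
def pvRaySet (g : List (List Char)) : PySem.Set String :=
  (List.range 9).foldl (fun s (row : Nat) =>
    (List.range 9).foldl (fun s (col : Nat) =>
      pvDirs.foldl (fun s d => pvRayAdd g d.1 d.2 9 (row : Int) (col : Int) [] s) s) s)
    (PySem.Set.add PySem.Set.empty "")

def find_words_in_9x9_section_alt (section_ : String) (words : List String) : List String :=
  let grid := pvGrid section_.toList
  let readable := pvRaySet grid
  words.filter (fun w => PySem.Set.contains readable w)

-- ===== PRECONDITION & SPEC =====
def Spec_find_words_in_9x9_section (section_ : String) (words : List String) (out : List String) : Prop := out = find_words_in_9x9_section_alt section_ words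
instance (section_ : String) (words : List String) (out : List String) : Decidable (Spec_find_words_in_9x9_section section_ words out) := by unfold Spec_find_words_in_9x9_section; infer_instance

-- ===== CLAIM (what is proved, stated in full; the proofs are below) =====
def Claim_equal_find_words_in_9x9_section : Prop := ∀ (section_ : String) (words : List String), Dom_find_words_in_9x9_section section_ words → Spec_find_words_in_9x9_section section_ words (find_words_in_9x9_section section_ words)

-- ===== LEMMAS AND PROOFS =====

-- membership in a foldl of "add-only" steps
theorem pv_mem_foldl {α : Type} (f : PySem.Set String → α → PySem.Set String)
    (P : α → String → Prop)
    (hf : ∀ s a x, x ∈ f s a ↔ x ∈ s ∨ P a x) :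
    ∀ (l : List α) (s : PySem.Set String) (x : String),
      x ∈ l.foldl f s ↔ x ∈ s ∨ ∃ a ∈ l, P a x := by
  intro l
  induction l with
  | nil => intro s x; simp
  | cons a l ih =>
    intro s x
    rw [List.foldl_cons, ih, hf]
    simp only [List.mem_cons]
    constructor
    · rintro ((hx | hp) | ⟨b, hb, hpb⟩)
      · exact Or.inl hx
      · exact Or.inr ⟨a, Or.inl rfl, hp⟩
      · exact Or.inr ⟨b, Or.inr hb, hpb⟩
    · rintro (hx | ⟨b, (rfl | hb), hpb⟩)
      · exact Or.inl (Or.inl hx)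
      · exact Or.inl (Or.inr hpb)
      · exact Or.inr ⟨b, hb, hpb⟩

-- what pvRayAdd puts into the set: exactly the nonempty words (of length ≤ fuel)
-- readable from (r,c), prefixed by acc
theorem pv_mem_rayAdd (g : List (List Char)) (dr dc : Int) :
    ∀ (fuel : Nat) (r c : Int) (acc : List Char) (s : PySem.Set String) (x : String),
      x ∈ pvRayAdd g dr dc fuel r c acc s ↔
        x ∈ s ∨ ∃ w : List Char, w ≠ [] ∧ w.length ≤ fuel ∧
          pvCheckAt g w r c dr dc = true ∧ x = String.ofList (acc ++ w) := by
  intro fuel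
  induction fuel with
  | zero =>
    intro r c acc s x
    simp only [pvRayAdd]
    constructor
    · exact Or.inl
    · rintro (h | ⟨w, hw, hlen, -, -⟩)
      · exact h
      · cases w with
        | nil => exact absurd rfl hw
        | cons a l => simp at hlen
  | succ n ih =>
    intro r c acc s x
    by_cases hb : 0 ≤ r ∧ r < 9 ∧ 0 ≤ c ∧ c < 9
    · have hnb : ¬(r < 0 ∨ 9 ≤ r ∨ c < 0 ∨ 9 ≤ c) := by push_neg; omega
      rw [show pvRayAdd g dr dc (n+1) r c acc s =
          pvRayAdd g dr dc n (r + dr) (c + dc) (acc ++ [(g.getD r.toNat []).getD c.toNat ' '])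
            (PySem.Set.add s (String.ofList (acc ++ [(g.getD r.toNat []).getD c.toNat ' '])))
          from by simp [pvRayAdd, hb]]
      rw [ih, PySem.Set.mem_add]
      constructor
      · rintro ((hx | rfl) | ⟨w', hne, hlen, hch, rfl⟩)
        · exact Or.inl hx
        · refine Or.inr ⟨[(g.getD r.toNat []).getD c.toNat ' '], by simp, by simp, ?_, rfl⟩
          simp [pvCheckAt, hnb]
        · refine Or.inr ⟨(g.getD r.toNat []).getD c.toNat ' ' :: w', by simp, by simp; omega, ?_, by simp⟩
          simp only [pvCheckAt, if_neg hnb]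
          simpa using hch
      · rintro (hx | ⟨w, hne, hlen, hch, rfl⟩)
        · exact Or.inl (Or.inl hx)
        · obtain ⟨ch, rest, rfl⟩ := List.exists_cons_of_ne_nil hne
          simp only [pvCheckAt, if_neg hnb] at hch
          split_ifs at hch with hx2
          have hceq : (g.getD r.toNat []).getD c.toNat ' ' = ch := by
            by_contra hcc; exact hx2 hcc
          cases rest with
          | nil => exact Or.inl (Or.inr (by rw [hceq]))
          | cons c2 t =>
            refine Or.inr ⟨c2 :: t, by simp, by simp at hlen ⊢; omega, hch, ?_⟩
            rw [hceq]; simp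
    · have hnb : (r < 0 ∨ 9 ≤ r ∨ c < 0 ∨ 9 ≤ c) := by by_contra hcc; push_neg at hcc; exact hb (by omega)
      rw [show pvRayAdd g dr dc (n+1) r c acc s = s from by simp [pvRayAdd, hb]]
      constructor
      · exact Or.inl
      · rintro (h | ⟨w, hne, hlen, hch, rfl⟩)
        · exact h
        · obtain ⟨ch, rest, rfl⟩ := List.exists_cons_of_ne_nil hne
          simp [pvCheckAt, hnb] at hch
  
-- remaining in-bounds steps available in one coordinate for step direction d
def pvPot (d p : Int) : Nat := if d = 1 then (9 - p).toNat else if d = -1 then (p + 1).toNat else 9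

theorem pv_check_len (g : List (List Char)) (dr dc : Int)
    (hdr : dr = -1 ∨ dr = 0 ∨ dr = 1) (hdc : dc = -1 ∨ dc = 0 ∨ dc = 1)
    (hne : ¬(dr = 0 ∧ dc = 0)) (w : List Char) :
    ∀ (r c : Int), pvCheckAt g w r c dr dc = true →
      w.length ≤ min (pvPot dr r) (pvPot dc c) := by
  induction w with
  | nil => intro r c _; simp
  | cons ch rest ih =>
    intro r c hch
    simp only [pvCheckAt] at hch
    split_ifs at hch with h1 h2
    push_neg at h1
    have hrec := ih (r + dr) (c + dc) hch
    rcases hdr with rfl | rfl | rfl <;> rcases hdc with rfl | rfl | rfl <;>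
      first
        | exact absurd ⟨rfl, rfl⟩ hne
        | (simp [pvPot] at hrec ⊢; omega)

theorem pv_check_len9 (g : List (List Char)) (d : Int × Int) (hd : d ∈ pvDirs)
    (w : List Char) (hw : w ≠ []) (r c : Int)
    (hch : pvCheckAt g w r c d.1 d.2 = true) : w.length ≤ 9 := by
  obtain ⟨ch, rest, rfl⟩ := List.exists_cons_of_ne_nil hw
  have hb : 0 ≤ r ∧ r < 9 ∧ 0 ≤ c ∧ c < 9 := by
    have h := hch
    simp only [pvCheckAt] at h
    split_ifs at h with h1 h2
    push_neg at h1
    omega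
  simp only [pvDirs, List.mem_cons, List.not_mem_nil, or_false] at hd
  rcases hd with rfl | rfl | rfl | rfl | rfl | rfl | rfl | rfl <;>
  · have hlen := pv_check_len g _ _ (by decide) (by decide) (by decide) (ch :: rest) r c hch
    simp [pvPot] at hlen ⊢
    omega

set_option maxRecDepth 8192 in
theorem pv_mem_raySet (g : List (List Char)) (x : String) :
    x ∈ pvRaySet g ↔ x = "" ∨ ∃ row ∈ List.range 9, ∃ col ∈ List.range 9, ∃ d ∈ pvDirs,
      ∃ w : List Char, w ≠ [] ∧ w.length ≤ 9 ∧
        pvCheckAt g w (row : Int) (col : Int) d.1 d.2 = true ∧ x = String.ofList w := by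
  have hray : ∀ (row col : Nat) (s : PySem.Set String) (d : Int × Int) (y : String),
      y ∈ pvRayAdd g d.1 d.2 9 (row : Int) (col : Int) [] s ↔ y ∈ s ∨
        ∃ w : List Char, w ≠ [] ∧ w.length ≤ 9 ∧
          pvCheckAt g w (row : Int) (col : Int) d.1 d.2 = true ∧ y = String.ofList w := by
    intro row col s d y
    simpa using pv_mem_rayAdd g d.1 d.2 9 (row : Int) (col : Int) [] s y
  have hdirs : ∀ (row col : Nat) (s : PySem.Set String) (y : String),
      y ∈ pvDirs.foldl (fun s d => pvRayAdd g d.1 d.2 9 (row : Int) (col : Int) [] s) s ↔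
        y ∈ s ∨ ∃ d ∈ pvDirs, ∃ w : List Char, w ≠ [] ∧ w.length ≤ 9 ∧
          pvCheckAt g w (row : Int) (col : Int) d.1 d.2 = true ∧ y = String.ofList w :=
    fun row col => pv_mem_foldl _ _ (fun s d y => hray row col s d y) pvDirs
  have hcols : ∀ (row : Nat) (s : PySem.Set String) (y : String),
      y ∈ (List.range 9).foldl (fun s (col : Nat) =>
          pvDirs.foldl (fun s d => pvRayAdd g d.1 d.2 9 (row : Int) (col : Int) [] s) s) s ↔
        y ∈ s ∨ ∃ col ∈ List.range 9, ∃ d ∈ pvDirs, ∃ w : List Char, w ≠ [] ∧ w.length ≤ 9 ∧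
          pvCheckAt g w (row : Int) (col : Int) d.1 d.2 = true ∧ y = String.ofList w :=
    fun row => pv_mem_foldl _ _ (fun s col y => hdirs row col s y) (List.range 9)
  have hrows := pv_mem_foldl _ _
    (fun (s : PySem.Set String) (row : Nat) (y : String) => hcols row s y) (List.range 9)
  rw [pvRaySet, hrows, PySem.Set.mem_add]
  simp only [PySem.Set.empty, List.not_mem_nil, false_or]

theorem pv_word_iff (g : List (List Char)) (w : String) :
    pvFindInGrid g w.toList = PySem.Set.contains (pvRaySet g) w := by
  have hA : pvFindInGrid g w.toList = true ↔
      ∃ row ∈ List.range 9, ∃ col ∈ List.range 9, ∃ d ∈ pvDirs,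
        pvCheckAt g w.toList (row : Int) (col : Int) d.1 d.2 = true := by
    simp [pvFindInGrid]
  have hB : PySem.Set.contains (pvRaySet g) w = true ↔ w ∈ pvRaySet g :=
    PySem.Set.contains_iff _ _
  have key : (∃ row ∈ List.range 9, ∃ col ∈ List.range 9, ∃ d ∈ pvDirs,
      pvCheckAt g w.toList (row : Int) (col : Int) d.1 d.2 = true) ↔ w ∈ pvRaySet g := by
    rw [pv_mem_raySet]
    rcases hwl : w.toList with _ | ⟨ch, rest⟩
    · apply iff_of_true
      · exact ⟨0, by simp, 0, by simp, (0, 1), by simp [pvDirs], by simp [pvCheckAt]⟩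
      · left
        have := congrArg String.ofList hwl
        simpa using this
    · constructor
      · rintro ⟨row, hrow, col, hcol, d, hd, hch⟩
        exact Or.inr ⟨row, hrow, col, hcol, d, hd, ch :: rest, by simp,
          pv_check_len9 g d hd _ (by simp) _ _ hch, hch, by rw [← hwl]; simp⟩
      · rintro (rfl | ⟨row, hrow, col, hcol, d, hd, w', hne, hlen, hch, hx⟩)
        · simp at hwl
        · have hwt : w.toList = w' := by rw [hx]; simp
          have hcr : (ch :: rest) = w' := hwl.symm.trans hwt
          exact ⟨row, hrow, col, hcol, d, hd, by rw [hcr]; exact hch⟩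
  have h := (hA.trans key).trans hB.symm
  cases hc : pvFindInGrid g w.toList with
  | false =>
    cases hc2 : PySem.Set.contains (pvRaySet g) w with
    | false => rfl
    | true => exact hc.symm.trans (h.mpr hc2)
  | true => exact (h.mp hc).symm

-- ===== VERDICT (by name: the statement is the Claim_ definition above) =====
theorem find_words_in_9x9_section_spec : Claim_equal_find_words_in_9x9_section := by
  intro section_ words _
  unfold Spec_find_words_in_9x9_section find_words_in_9x9_section find_words_in_9x9_section_alt
  exact List.filter_congr (fun w _ => pv_word_iff (pvGrid section_.toList) w)
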